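-- pv_equiv track=rewrite | github.com/o-bscure/AoC2021 | day9.py | solve
-- ===== SOURCE A (Python) =====
-- def solve(array_2d):
--     dim1 = len(array_2d)
--     dim2 = len(array_2d[0])
--     ans = []
--     ans_pos = []
--     for i, row in enumerate(array_2d):
--         for j, val in enumerate(row):
--             greater_than_all = True
--             for adj1, adj2  in adjacent(i, j, dim1, dim2):
--                 greater_than_all = bool(array_2d[adj1][adj2] > val) and greater_than_all
--             if greater_than_all:
--                 ans.append(val)
--                 ans_pos.append((i,j))
--     return ans
--
-- def adjacent(i1, i2, len1, len2):
--     options = [(i1+1, i2), (i1-1, i2), (i1, i2+1), (i1, i2-1)]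
--     ans = []
--     for i, j in options:
--         if (i<0) or (i>=len1) or (j<0) or (j>=len2):
--             continue
--         ans.append((i,j))
--     return ans
-- ===== SOURCE B (Python) =====
-- def solve(array_2d):
--     dim1 = len(array_2d)
--     dim2 = len(array_2d[0])
--     mask = [[True] * len(row) for row in array_2d]
--     for di, dj in ((1, 0), (-1, 0), (0, 1), (0, -1)):
--         mask = [[m and (not (0 <= i + di < dim1 and 0 <= j + dj < dim2)
--                         or array_2d[i][j] < array_2d[i + di][j + dj])
--                  for j, m in enumerate(row)]
--                 for i, row in enumerate(mask)]
--     return [array_2d[i][j]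
--             for i, row in enumerate(mask)
--             for j, m in enumerate(row) if m]
-- ===== Notes on version B (the rewrite author's own statement) =====
-- stated objective: alternative
-- what changed: Replaces A's cell-by-cell scan that builds and folds a per-cell neighbour list (plus an unused positions list) with four whole-grid direction sweeps refining a boolean low-point mask, followed by one collection pass.
import Mathlib
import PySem

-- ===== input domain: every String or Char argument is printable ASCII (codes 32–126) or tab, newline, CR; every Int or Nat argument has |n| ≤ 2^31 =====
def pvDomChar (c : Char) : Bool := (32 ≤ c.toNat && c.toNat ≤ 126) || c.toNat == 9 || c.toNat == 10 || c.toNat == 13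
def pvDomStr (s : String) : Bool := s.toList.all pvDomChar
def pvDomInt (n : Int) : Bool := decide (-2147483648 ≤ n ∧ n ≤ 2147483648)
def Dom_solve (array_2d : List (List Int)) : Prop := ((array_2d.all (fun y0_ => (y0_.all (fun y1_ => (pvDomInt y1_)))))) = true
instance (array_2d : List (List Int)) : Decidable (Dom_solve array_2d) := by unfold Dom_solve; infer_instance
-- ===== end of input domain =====

-- B replaces A's cell-by-cell neighbour-list scan by four whole-grid direction sweeps that
-- refine a boolean low-point mask, then one collection pass (objective: alternative decomposition).
-- A mutates nothing that survives the call; equivalence is about the return value.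

-- ===== PORT A =====
def pyAdjacent (i1 i2 len1 len2 : Int) : List (Int × Int) :=
  [(i1+1, i2), (i1-1, i2), (i1, i2+1), (i1, i2-1)].foldl
    (fun ans p => if p.1 < 0 ∨ p.1 ≥ len1 ∨ p.2 < 0 ∨ p.2 ≥ len2 then ans else ans ++ [p]) []

def solve (array_2d : List (List Int)) : List Int :=
  let dim1 : Int := PySem.List.len array_2d
  let dim2 : Int := PySem.List.len (PySem.List.pyGetD array_2d 0 [])
  -- pair state (ans, ans_pos); indexing array_2d[adj1][adj2] via pyGetD (in range under Pre_solve)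
  let st := (PySem.List.enumerate array_2d 0).foldl
    (fun (st : List Int × List (Int × Int)) ir =>
      (PySem.List.enumerate ir.2 0).foldl
        (fun st2 jv =>
          let gta := (pyAdjacent ir.1 jv.1 dim1 dim2).foldl
            (fun acc p =>
              decide (PySem.List.pyGetD (PySem.List.pyGetD array_2d p.1 []) p.2 0 > jv.2) && acc)
            true
          if gta then (st2.1 ++ [jv.2], st2.2 ++ [(ir.1, jv.1)]) else st2)
        st)
    ([], [])
  st.1

-- ===== PORT B =====
-- one direction sweep of Source B: mask[i][j] &= (neighbour out of bounds or grid[i][j] < neighbour)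
def lowMaskStep (array_2d : List (List Int)) (dim1 dim2 : Int)
    (mask : List (List Bool)) (d : Int × Int) : List (List Bool) :=
  (PySem.List.enumerate mask 0).map (fun ir =>
    (PySem.List.enumerate ir.2 0).map (fun jm =>
      jm.2 && (!decide (0 ≤ ir.1 + d.1 ∧ ir.1 + d.1 < dim1 ∧ 0 ≤ jm.1 + d.2 ∧ jm.1 + d.2 < dim2)
        || decide (PySem.List.pyGetD (PySem.List.pyGetD array_2d ir.1 []) jm.1 0 <
                   PySem.List.pyGetD (PySem.List.pyGetD array_2d (ir.1 + d.1) []) (jm.1 + d.2) 0))))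

def solve_alt (array_2d : List (List Int)) : List Int :=
  let dim1 : Int := PySem.List.len array_2d
  let dim2 : Int := PySem.List.len (PySem.List.pyGetD array_2d 0 [])
  let mask0 : List (List Bool) := array_2d.map (fun row => row.map (fun _ => true))
  let mask := [((1:Int), (0:Int)), (-1, 0), (0, 1), (0, -1)].foldl
    (lowMaskStep array_2d dim1 dim2) mask0
  (PySem.List.enumerate mask 0).flatMap (fun ir =>
    ((PySem.List.enumerate ir.2 0).filter (fun jm => jm.2)).map (fun jm =>
      PySem.List.pyGetD (PySem.List.pyGetD array_2d ir.1 []) jm.1 0))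

-- ===== PRECONDITION & SPEC =====
-- Pre_solve is exactly where Python A returns: the grid is nonempty (else len(array_2d[0]) raises
-- IndexError) and every neighbour access array_2d[adj1][adj2] that A performs — governed by the
-- first row's length dim2 — is in range (else IndexError on a ragged grid).
def Pre_solve (array_2d : List (List Int)) : Prop :=
  array_2d ≠ [] ∧ ∀ i < array_2d.length, ∀ j < (array_2d.getD i []).length,
    ((i + 1 < array_2d.length ∧ j < array_2d.headI.length) → j < (array_2d.getD (i+1) []).length) ∧
    ((1 ≤ i ∧ j < array_2d.headI.length) → j < (array_2d.getD (i-1) []).length) ∧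
    (j + 1 < array_2d.headI.length → j + 1 < (array_2d.getD i []).length)
instance (array_2d : List (List Int)) : Decidable (Pre_solve array_2d) := by
  unfold Pre_solve; infer_instance
def pvWitness_solve : List (List Int) := [[2, 1, 3], [4, 5, 0]]

def Spec_solve (array_2d : List (List Int)) (out : List Int) : Prop := out = solve_alt array_2d
instance (array_2d : List (List Int)) (out : List Int) : Decidable (Spec_solve array_2d out) := by
  unfold Spec_solve; infer_instance

-- ===== CLAIM (what is proved, stated in full; the proofs are below) =====
def Claim_equal_solve : Prop := ∀ (array_2d : List (List Int)), Dom_solve array_2d → Pre_solve array_2d → Spec_solve array_2d (solve array_2d)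

-- ===== LEMMAS AND PROOFS =====

-- the grid cell g[i][j] as both ports read it
def cellG (g : List (List Int)) (i j : Int) : Int :=
  PySem.List.pyGetD (PySem.List.pyGetD g i []) j 0

-- one direction's factor of the low-point test
def dirCond (g : List (List Int)) (dim1 dim2 : Int) (i j di dj : Int) : Bool :=
  !decide (0 ≤ i + di ∧ i + di < dim1 ∧ 0 ≤ j + dj ∧ j + dj < dim2)
    || decide (cellG g i j < cellG g (i + di) (j + dj))

-- the final per-cell mask value B computes
def lowB (g : List (List Int)) (dim1 dim2 : Int) (i j : Int) : Bool :=
  (((true && dirCond g dim1 dim2 i j 1 0) && dirCond g dim1 dim2 i j (-1) 0)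
    && dirCond g dim1 dim2 i j 0 1) && dirCond g dim1 dim2 i j 0 (-1)

-- a mask indexed like g whose (i,j) entry is q i j
def maskOf (g : List (List Int)) (q : Int → Int → Bool) : List (List Bool) :=
  (PySem.List.enumerate g 0).map (fun ir =>
    (PySem.List.enumerate ir.2 0).map (fun jm => q ir.1 jm.1))

theorem enumerate_map {α β : Type} (f : α → β) (l : List α) (s : Int) :
    PySem.List.enumerate (l.map f) s = (PySem.List.enumerate l s).map (fun p => (p.1, f p.2)) := by
  induction l generalizing s with
  | nil => simp [PySem.List.enumerate_nil]
  | cons x xs ih => simp [PySem.List.enumerate_cons, ih]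

theorem enumerate_enumerate {α : Type} (l : List α) (s : Int) :
    PySem.List.enumerate (PySem.List.enumerate l s) s
      = (PySem.List.enumerate l s).map (fun p => (p.1, p)) := by
  induction l generalizing s with
  | nil => simp [PySem.List.enumerate_nil]
  | cons x xs ih => simp [PySem.List.enumerate_cons, ih]

theorem map_enumerate_const_snd {α β : Type} (h : α → β) (l : List α) (s : Int) :
    (PySem.List.enumerate l s).map (fun p => h p.2) = l.map h := by
  induction l generalizing s with
  | nil => simp [PySem.List.enumerate_nil]
  | cons x xs ih => simp [PySem.List.enumerate_cons, ih]

theorem lowMaskStep_maskOf (g : List (List Int)) (dim1 dim2 : Int)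
    (q : Int → Int → Bool) (d : Int × Int) :
    lowMaskStep g dim1 dim2 (maskOf g q) d
      = maskOf g (fun i j => q i j &&
          dirCond g dim1 dim2 i j d.1 d.2) := by
  simp [lowMaskStep, maskOf, enumerate_map, enumerate_enumerate, List.map_map,
    Function.comp, dirCond, cellG]
  intros; rfl

theorem mask0_eq_maskOf (g : List (List Int)) :
    g.map (fun row => row.map (fun _ => true)) = maskOf g (fun _ _ => true) := by
  unfold maskOf
  rw [← map_enumerate_const_snd (fun row => row.map (fun _ => true)) g 0]
  exact List.map_congr_left (fun p _ => by
    rw [← map_enumerate_const_snd (fun _ => true) p.2 0])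

-- B as a flatMap over the grid with the per-cell predicate lowB
theorem solve_alt_eq (g : List (List Int)) :
    solve_alt g = (PySem.List.enumerate g 0).flatMap (fun ir =>
      ((PySem.List.enumerate ir.2 0).filter (fun jm => lowB g (PySem.List.len g)
          (PySem.List.len (PySem.List.pyGetD g 0 [])) ir.1 jm.1)).map (fun jm =>
        cellG g ir.1 jm.1)) := by
  unfold solve_alt
  rw [mask0_eq_maskOf]
  simp only [List.foldl_cons, List.foldl_nil, lowMaskStep_maskOf]
  simp [maskOf, enumerate_map, enumerate_enumerate, List.map_map, Function.comp_def,
    List.flatMap_map, List.filter_map, cellG, lowB]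

-- pair-state append fold: both components accumulate independently
theorem foldl_pair_append {α β γ : Type} (l : List α)
    (step : List β × List γ → α → List β × List γ) (F : α → List β) (G : α → List γ)
    (h : ∀ st x, x ∈ l → step st x = (st.1 ++ F x, st.2 ++ G x)) (st : List β × List γ) :
    l.foldl step st = (st.1 ++ l.flatMap F, st.2 ++ l.flatMap G) := by
  induction l generalizing st with
  | nil => simp
  | cons x xs ih =>
    rw [List.foldl_cons, h st x (by simp),
      ih (fun st y hy => h st y (by simp [hy])) _]
    simp

theorem flatMap_if_singleton {α β : Type} (l : List α) (p : α → Bool) (f : α → β) :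
    l.flatMap (fun x => if p x then [f x] else []) = (l.filter p).map f := by
  induction l with
  | nil => simp
  | cons x xs ih => by_cases h : p x <;> simp [h, ih]

-- A's inner low-point test equals lowB
theorem acell_eq_lowB (g : List (List Int)) (d1 d2 i j : Int) :
    (pyAdjacent i j d1 d2).foldl
        (fun acc p => decide (cellG g p.1 p.2 > cellG g i j) && acc) true
      = lowB g d1 d2 i j := by
  have k1 : dirCond g d1 d2 i j 1 0
      = if i + 1 < 0 ∨ i + 1 ≥ d1 ∨ j < 0 ∨ j ≥ d2 then true
        else decide (cellG g i j < cellG g (i + 1) j) := by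
    by_cases h : i + 1 < 0 ∨ i + 1 ≥ d1 ∨ j < 0 ∨ j ≥ d2
    · have hd : decide (0 ≤ i + 1 ∧ i + 1 < d1 ∧ 0 ≤ j + 0 ∧ j + 0 < d2) = false :=
        decide_eq_false (by omega)
      simp only [dirCond, hd, Bool.not_false, Bool.true_or, if_pos h]
    · simp only [dirCond, if_neg h, add_zero]
      simp [show 0 ≤ i + 1 ∧ i + 1 < d1 ∧ 0 ≤ j ∧ j < d2 from by omega]
  have k2 : dirCond g d1 d2 i j (-1) 0
      = if i - 1 < 0 ∨ i - 1 ≥ d1 ∨ j < 0 ∨ j ≥ d2 then true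
        else decide (cellG g i j < cellG g (i - 1) j) := by
    by_cases h : i - 1 < 0 ∨ i - 1 ≥ d1 ∨ j < 0 ∨ j ≥ d2
    · have hd : decide (0 ≤ i + -1 ∧ i + -1 < d1 ∧ 0 ≤ j + 0 ∧ j + 0 < d2) = false :=
        decide_eq_false (by omega)
      simp only [dirCond, hd, Bool.not_false, Bool.true_or, if_pos h]
    · simp only [dirCond, if_neg h, add_zero, Int.add_neg_one]
      simp [show 0 ≤ i - 1 ∧ i - 1 < d1 ∧ 0 ≤ j ∧ j < d2 from by omega]
      exact fun hlt => absurd hlt (by omega)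
  have k3 : dirCond g d1 d2 i j 0 1
      = if i < 0 ∨ i ≥ d1 ∨ j + 1 < 0 ∨ j + 1 ≥ d2 then true
        else decide (cellG g i j < cellG g i (j + 1)) := by
    by_cases h : i < 0 ∨ i ≥ d1 ∨ j + 1 < 0 ∨ j + 1 ≥ d2
    · have hd : decide (0 ≤ i + 0 ∧ i + 0 < d1 ∧ 0 ≤ j + 1 ∧ j + 1 < d2) = false :=
        decide_eq_false (by omega)
      simp only [dirCond, hd, Bool.not_false, Bool.true_or, if_pos h]
    · simp only [dirCond, if_neg h, add_zero]
      simp [show 0 ≤ i ∧ i < d1 ∧ 0 ≤ j + 1 ∧ j + 1 < d2 from by omega]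
  have k4 : dirCond g d1 d2 i j 0 (-1)
      = if i < 0 ∨ i ≥ d1 ∨ j - 1 < 0 ∨ j - 1 ≥ d2 then true
        else decide (cellG g i j < cellG g i (j - 1)) := by
    by_cases h : i < 0 ∨ i ≥ d1 ∨ j - 1 < 0 ∨ j - 1 ≥ d2
    · have hd : decide (0 ≤ i + 0 ∧ i + 0 < d1 ∧ 0 ≤ j + -1 ∧ j + -1 < d2) = false :=
        decide_eq_false (by omega)
      simp only [dirCond, hd, Bool.not_false, Bool.true_or, if_pos h]
    · simp only [dirCond, if_neg h, add_zero, Int.add_neg_one]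
      simp [show 0 ≤ i ∧ i < d1 ∧ 0 ≤ j - 1 ∧ j - 1 < d2 from by omega]
      exact fun hlt => absurd hlt (by omega)
  unfold pyAdjacent lowB
  rw [k1, k2, k3, k4]
  simp only [List.foldl_cons, List.foldl_nil]
  split_ifs <;>
    simp [gt_iff_lt, Bool.and_comm, Bool.and_left_comm, Bool.and_assoc]

theorem cell_of_mem (g : List (List Int)) (ir : Int × List Int) (jv : Int × Int)
    (hir : ir ∈ PySem.List.enumerate g 0) (hjv : jv ∈ PySem.List.enumerate ir.2 0) :
    jv.2 = cellG g ir.1 jv.1 := by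
  rw [PySem.List.mem_enumerate_iff] at hir hjv
  obtain ⟨k, hk, rfl⟩ := hir
  obtain ⟨m, hm, rfl⟩ := hjv
  simp [cellG, List.getD_eq_getElem?_getD, hk, hm]

theorem solve_eq_solve_alt (g : List (List Int)) : solve g = solve_alt g := by
  rw [solve_alt_eq]
  unfold solve
  dsimp only
  rw [foldl_pair_append _ _
      (fun ir => ((PySem.List.enumerate ir.2 0).filter (fun jv => lowB g (PySem.List.len g)
          (PySem.List.len (PySem.List.pyGetD g 0 [])) ir.1 jv.1)).map (fun jv => jv.2))
      (fun ir => ((PySem.List.enumerate ir.2 0).filter (fun jv => lowB g (PySem.List.len g)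
          (PySem.List.len (PySem.List.pyGetD g 0 [])) ir.1 jv.1)).map (fun jv => (ir.1, jv.1)))
      ?_ ([], [])]
  · simp only [List.nil_append]
    refine List.flatMap_congr (fun ir hir => ?_)
    refine List.map_congr_left (fun jv hjv => ?_)
    exact cell_of_mem g ir jv hir (List.mem_of_mem_filter hjv)
  · intro st ir hir
    have key : ∀ jv ∈ PySem.List.enumerate ir.2 0,
        (pyAdjacent ir.1 jv.1 (PySem.List.len g)
            (PySem.List.len (PySem.List.pyGetD g 0 []))).foldl
          (fun acc p =>
            decide (PySem.List.pyGetD (PySem.List.pyGetD g p.1 []) p.2 0 > jv.2) && acc) true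
          = lowB g (PySem.List.len g) (PySem.List.len (PySem.List.pyGetD g 0 [])) ir.1 jv.1 := by
      intro jv hjv
      rw [cell_of_mem g ir jv hir hjv]
      exact acell_eq_lowB g _ _ ir.1 jv.1
    rw [foldl_pair_append _ _
        (fun jv => if lowB g (PySem.List.len g)
            (PySem.List.len (PySem.List.pyGetD g 0 [])) ir.1 jv.1 then [jv.2] else [])
        (fun jv => if lowB g (PySem.List.len g)
            (PySem.List.len (PySem.List.pyGetD g 0 [])) ir.1 jv.1 then [(ir.1, jv.1)] else [])
        ?_ st]
    · have h1 := flatMap_if_singleton (PySem.List.enumerate ir.2 0)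
        (fun jv => lowB g (PySem.List.len g)
          (PySem.List.len (PySem.List.pyGetD g 0 [])) ir.1 jv.1)
        (fun jv : Int × Int => jv.2)
      have h2 := flatMap_if_singleton (PySem.List.enumerate ir.2 0)
        (fun jv => lowB g (PySem.List.len g)
          (PySem.List.len (PySem.List.pyGetD g 0 [])) ir.1 jv.1)
        (fun jv : Int × Int => ((ir.1, jv.1) : Int × Int))
      simp only [PySem.List.len_eq] at h1 h2 ⊢
      rw [h1, h2]
    · intro st2 jv hjv
      dsimp only
      rw [key jv hjv]
      by_cases h : lowB g (PySem.List.len g)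
          (PySem.List.len (PySem.List.pyGetD g 0 [])) ir.1 jv.1
      · simp only [PySem.List.len_eq] at h
        simp [h]
      · simp only [PySem.List.len_eq] at h
        simp [h]

-- ===== VERDICT (by name: the statement is the Claim_ definition above) =====
theorem solve_spec : Claim_equal_solve := by
  intro g _ _
  unfold Spec_solve
  exact solve_eq_solve_alt g
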